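-- pv_equiv track=rewrite | github.com/xenoISA/isA_user | microservices/auth_service/rate_limit_state.py | merge_rate_limits
-- ===== SOURCE A (Python) =====
-- from typing import Any, Dict, Mapping, Optional, Tuple
--
-- RATE_LIMIT_FIELDS = (
--     "requests_per_second",
--     "requests_per_minute",
--     "requests_per_day",
--     "tokens_per_day",
-- )
--
-- def merge_rate_limits(
--     org_limits: Optional[Mapping[str, Any]],
--     key_limits: Optional[Mapping[str, Any]],
-- ) -> Tuple[Dict[str, Optional[int]], Dict[str, str]]:
--     """Merge org defaults with per-key overrides.
--
--     Semantics:
--     - If a key-level field is present, it wins even when its value is ``None``.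
--     - Missing key-level fields fall back to the org default.
--     - Missing fields in both scopes resolve to ``None`` and ``unset``.
--     """
--
--     org = dict(org_limits or {})
--     key = dict(key_limits or {})
--     effective: Dict[str, Optional[int]] = {}
--     sources: Dict[str, str] = {}
--
--     for field in RATE_LIMIT_FIELDS:
--         if field in key:
--             effective[field] = key.get(field)
--             sources[field] = "api_key"
--         elif field in org:
--             effective[field] = org.get(field)
--             sources[field] = "organization"
--         else:
--             effective[field] = None
--             sources[field] = "unset"
--
--     return effective, sources
-- ===== SOURCE B (Python) =====
-- RATE_LIMIT_FIELDS = (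
--     "requests_per_second",
--     "requests_per_minute",
--     "requests_per_day",
--     "tokens_per_day",
-- )
--
-- def merge_rate_limits(org_limits, key_limits):
--     # Provenance-first: resolve each field's SOURCE by searching a priority
--     # list of labelled layers ("unset" is a catch-all empty layer), then derive
--     # the effective VALUES from the already-computed sources.
--     layers = [
--         ("api_key", dict(key_limits or {})),
--         ("organization", dict(org_limits or {})),
--         ("unset", {}),
--     ]
--     sources = {
--         f: next(lbl for lbl, layer in layers if lbl == "unset" or f in layer)
--         for f in RATE_LIMIT_FIELDS
--     }
--     effective = {
--         f: next(layer for lbl, layer in layers if lbl == src).get(f)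
--         for f, src in sources.items()
--     }
--     return effective, sources
-- ===== Notes on version B (the rewrite author's own statement) =====
-- stated objective: alternative
-- what changed: B resolves provenance first: for each field it searches a priority list of labelled layers (api_key, organization, catch-all unset) to compute the sources dict, and then derives the effective values in a second stage by dereferencing each field's already-computed source back into its layer; A instead fills both dicts at once with a three-way branch per field.
import Mathlib
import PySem

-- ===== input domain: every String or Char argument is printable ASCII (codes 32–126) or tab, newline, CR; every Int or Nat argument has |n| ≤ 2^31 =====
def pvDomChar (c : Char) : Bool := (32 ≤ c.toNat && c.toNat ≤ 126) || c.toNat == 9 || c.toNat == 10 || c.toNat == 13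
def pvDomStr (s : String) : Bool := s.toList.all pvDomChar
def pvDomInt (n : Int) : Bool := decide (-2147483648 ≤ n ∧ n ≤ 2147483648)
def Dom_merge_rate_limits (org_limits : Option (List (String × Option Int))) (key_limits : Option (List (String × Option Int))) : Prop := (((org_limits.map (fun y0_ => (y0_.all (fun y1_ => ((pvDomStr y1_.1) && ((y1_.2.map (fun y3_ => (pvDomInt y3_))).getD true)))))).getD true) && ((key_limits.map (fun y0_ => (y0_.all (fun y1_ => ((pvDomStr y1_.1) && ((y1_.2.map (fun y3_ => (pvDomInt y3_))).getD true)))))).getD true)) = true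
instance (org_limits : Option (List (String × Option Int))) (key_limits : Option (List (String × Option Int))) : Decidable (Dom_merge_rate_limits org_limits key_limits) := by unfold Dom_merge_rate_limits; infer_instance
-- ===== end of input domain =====

-- B resolves each field's SOURCE first by searching a priority list of labelled layers,
-- then derives the effective VALUES from the computed sources; objective: alternative decomposition, same cost.

-- RATE_LIMIT_FIELDS
def pvFields : List String :=
  ["requests_per_second", "requests_per_minute", "requests_per_day", "tokens_per_day"]

-- ===== PORT A =====
def merge_rate_limits (org_limits : Option (List (String × Option Int))) (key_limits : Option (List (String × Option Int))) : (List (String × Option Int)) × (List (String × String)) :=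
  -- org = dict(org_limits or {}); key = dict(key_limits or {})
  let org : PySem.Dict String (Option Int) := PySem.Dict.ofList (org_limits.getD [])
  let key : PySem.Dict String (Option Int) := PySem.Dict.ofList (key_limits.getD [])
  -- for field in RATE_LIMIT_FIELDS: three-way branch
  let res := pvFields.foldl
    (fun (acc : PySem.Dict String (Option Int) × PySem.Dict String String) field =>
      if key.contains field then
        (acc.1.insert field (key.getD field none), acc.2.insert field "api_key")
      else if org.contains field then
        (acc.1.insert field (org.getD field none), acc.2.insert field "organization")
      else
        (acc.1.insert field none, acc.2.insert field "unset"))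
    (PySem.Dict.empty, PySem.Dict.empty)
  (res.1.items, res.2.items)

-- ===== PORT B =====
def merge_rate_limits_alt (org_limits : Option (List (String × Option Int))) (key_limits : Option (List (String × Option Int))) : (List (String × Option Int)) × (List (String × String)) :=
  -- layers = [("api_key", dict(key_limits or {})), ("organization", dict(org_limits or {})), ("unset", {})]
  let layers : List (String × PySem.Dict String (Option Int)) :=
    [("api_key", PySem.Dict.ofList (key_limits.getD [])),
     ("organization", PySem.Dict.ofList (org_limits.getD [])),
     ("unset", PySem.Dict.empty)]
  -- sources = {f: next(lbl for lbl, layer in layers if lbl == "unset" or f in layer) for f in RATE_LIMIT_FIELDS}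
  -- (the "unset" catch-all always matches, so the generator never exhausts; .getD "unset" is only the Option's totality default)
  let sources : PySem.Dict String String :=
    pvFields.foldl
      (fun d f =>
        d.insert f (((layers.find? (fun p => p.1 == "unset" || p.2.contains f)).map (·.1)).getD "unset"))
      PySem.Dict.empty
  -- effective = {f: next(layer for lbl, layer in layers if lbl == src).get(f) for f, src in sources.items()}
  -- (src is always one of the three labels, so find? is always some; .getD is only the totality default)
  let effective : PySem.Dict String (Option Int) :=
    sources.items.foldl
      (fun d p =>
        d.insert p.1
          ((((layers.find? (fun q => q.1 == p.2)).map (·.2)).getD PySem.Dict.empty).getD p.1 none))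
      PySem.Dict.empty
  (effective.items, sources.items)

-- ===== PRECONDITION & SPEC =====
def Spec_merge_rate_limits (org_limits : Option (List (String × Option Int))) (key_limits : Option (List (String × Option Int))) (out : (List (String × Option Int)) × (List (String × String))) : Prop := out = merge_rate_limits_alt org_limits key_limits
instance (org_limits : Option (List (String × Option Int))) (key_limits : Option (List (String × Option Int))) (out : (List (String × Option Int)) × (List (String × String))) : Decidable (Spec_merge_rate_limits org_limits key_limits out) := by unfold Spec_merge_rate_limits; infer_instance

-- ===== CLAIM (what is proved, stated in full; the proofs are below) =====
def Claim_equal_merge_rate_limits : Prop := ∀ (org_limits : Option (List (String × Option Int))) (key_limits : Option (List (String × Option Int))), Dom_merge_rate_limits org_limits key_limits → Spec_merge_rate_limits org_limits key_limits (merge_rate_limits org_limits key_limits)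

-- ===== LEMMAS AND PROOFS =====

-- pair fold splits componentwise
theorem foldl_pair {α β γ : Type} (g1 : α → γ → α) (g2 : β → γ → β) :
    ∀ (fs : List γ) (d1 : α) (d2 : β),
      fs.foldl (fun acc f => (g1 acc.1 f, g2 acc.2 f)) (d1, d2) = (fs.foldl g1 d1, fs.foldl g2 d2) := by
  intro fs
  induction fs with
  | nil => intro d1 d2; rfl
  | cons f fs ih => intro d1 d2; simpa using ih (g1 d1 f) (g2 d2 f)

-- inserting over the distinct fields into an empty dict lists them in order
theorem fresh_items {ν : Type} (v : String → ν) :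
    (pvFields.foldl (fun d f => d.insert f (v f)) PySem.Dict.empty).items
      = pvFields.map (fun f => (f, v f)) := by
  have h := PySem.Dict.items_foldl_insert_fresh pvFields (fun a => a) v
    PySem.Dict.empty (by intro a _; simp) (by simp; decide)
  simpa using h

-- same, folding over a list of pairs keyed by the first component
theorem fresh_items_pairs {σ ν : Type} (v : String × σ → ν) (l : List (String × σ))
    (hnd : (l.map (·.1)).Nodup) :
    (l.foldl (fun d p => d.insert p.1 (v p)) PySem.Dict.empty).items
      = l.map (fun p => (p.1, v p)) := by
  have h := PySem.Dict.items_foldl_insert_fresh l (·.1) v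
    PySem.Dict.empty (by intro a _; simp) hnd
  simpa using h

theorem merge_core (org key : PySem.Dict String (Option Int)) :
    (((pvFields.foldl
      (fun (acc : PySem.Dict String (Option Int) × PySem.Dict String String) field =>
        if key.contains field then
          (acc.1.insert field (key.getD field none), acc.2.insert field "api_key")
        else if org.contains field then
          (acc.1.insert field (org.getD field none), acc.2.insert field "organization")
        else
          (acc.1.insert field none, acc.2.insert field "unset"))
      (PySem.Dict.empty, PySem.Dict.empty)).1.items,
     (pvFields.foldl
      (fun (acc : PySem.Dict String (Option Int) × PySem.Dict String String) field =>
        if key.contains field then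
          (acc.1.insert field (key.getD field none), acc.2.insert field "api_key")
        else if org.contains field then
          (acc.1.insert field (org.getD field none), acc.2.insert field "organization")
        else
          (acc.1.insert field none, acc.2.insert field "unset"))
      (PySem.Dict.empty, PySem.Dict.empty)).2.items)
      : (List (String × Option Int)) × (List (String × String)))
    =
    (let layers : List (String × PySem.Dict String (Option Int)) :=
        [("api_key", key), ("organization", org), ("unset", PySem.Dict.empty)]
     let sources : PySem.Dict String String :=
        pvFields.foldl
          (fun d f =>
            d.insert f (((layers.find? (fun p => p.1 == "unset" || p.2.contains f)).map (·.1)).getD "unset"))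
          PySem.Dict.empty
     let effective : PySem.Dict String (Option Int) :=
        sources.items.foldl
          (fun d p =>
            d.insert p.1
              ((((layers.find? (fun q => q.1 == p.2)).map (·.2)).getD PySem.Dict.empty).getD p.1 none))
          PySem.Dict.empty
     (effective.items, sources.items)) := by
  -- abbreviations for A's per-field value and source
  set srcA : String → String := fun f =>
    if key.contains f then "api_key" else if org.contains f then "organization" else "unset" with hsrcA
  set valA : String → Option Int := fun f =>
    if key.contains f then key.getD f none else if org.contains f then org.getD f none else none with hvalA
  -- A's fold splits into two unconditional insert folds
  have hA : (fun (acc : PySem.Dict String (Option Int) × PySem.Dict String String) field =>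
        if key.contains field then
          (acc.1.insert field (key.getD field none), acc.2.insert field "api_key")
        else if org.contains field then
          (acc.1.insert field (org.getD field none), acc.2.insert field "organization")
        else
          (acc.1.insert field none, acc.2.insert field "unset"))
      = (fun acc field =>
          ((fun d f => d.insert f (valA f)) acc.1 field,
           (fun d f => d.insert f (srcA f)) acc.2 field)) := by
    funext acc field
    by_cases hk : key.contains field <;> by_cases ho : org.contains field <;>
      simp [hsrcA, hvalA, hk, ho]
  rw [hA, foldl_pair (fun d f => d.insert f (valA f)) (fun d f => d.insert f (srcA f)) pvFields
      PySem.Dict.empty PySem.Dict.empty]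
  -- B's source label agrees with A's
  have hsrc : ∀ f, ((([("api_key", key), ("organization", org), ("unset", (PySem.Dict.empty : PySem.Dict String (Option Int)))].find?
        (fun p => p.1 == "unset" || p.2.contains f)).map (·.1)).getD "unset") = srcA f := by
    intro f
    by_cases hk : key.contains f <;> by_cases ho : org.contains f <;>
      simp [List.find?, hsrcA, hk, ho]
  simp only [Prod.mk.injEq]
  have hsrcitems :
      (pvFields.foldl
        (fun d f =>
          d.insert f ((([("api_key", key), ("organization", org), ("unset", (PySem.Dict.empty : PySem.Dict String (Option Int)))].find?
            (fun p => p.1 == "unset" || p.2.contains f)).map (·.1)).getD "unset"))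
        PySem.Dict.empty).items = pvFields.map (fun f => (f, srcA f)) := by
    rw [fresh_items]
    exact List.map_congr_left (fun f _ => by rw [hsrc f])
  refine ⟨?_, ?_⟩
  · -- effective side
    rw [fresh_items valA, hsrcitems,
      fresh_items_pairs _ (pvFields.map (fun f => (f, srcA f)))
        (by rw [List.map_map]; exact (by decide : pvFields.Nodup)),
      List.map_map]
    apply List.map_congr_left
    intro f _
    by_cases hk : key.contains f <;> by_cases ho : org.contains f <;>
      simp [Function.comp, hsrcA, hvalA, hk, ho, List.find?]
  · rw [fresh_items srcA, hsrcitems]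

-- ===== VERDICT (by name: the statement is the Claim_ definition above) =====
theorem merge_rate_limits_spec : Claim_equal_merge_rate_limits := by
  intro org_limits key_limits _
  unfold Spec_merge_rate_limits merge_rate_limits merge_rate_limits_alt
  exact merge_core (PySem.Dict.ofList (org_limits.getD [])) (PySem.Dict.ofList (key_limits.getD []))
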